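-- pv_equiv track=rewrite | github.com/iRodEs/AdventOfCode2019 | Day4/my_solution.py | parteB
-- ===== SOURCE A (Python) =====
-- def parteB(numero):
--     stringified = str(numero)
--
--     cagada = False
--     double = 0
--     letra_anterior = -1
--     repeticiones = []
--     for letra in stringified:
--         if int(letra_anterior) <= int(letra):
--             if int(letra) == int(letra_anterior):
--                 double += 1
--             else:
--                 repeticiones.append(double)
--                 double = 1
--         else:
--             cagada = True
--         letra_anterior = letra
--     repeticiones.append(double)
--
--     if 2 in repeticiones and cagada is False:
--         return True
--     return False
-- ===== SOURCE B (Python) =====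
-- from itertools import groupby
--
-- def parteB(numero):
--     digits = [int(c) for c in str(numero)]
--     if digits != sorted(digits):
--         return False
--     return any(sum(1 for _ in g) == 2 for _, g in groupby(digits))
-- ===== Notes on version B (the rewrite author's own statement) =====
-- stated objective: simpler
-- what changed: A's single fused loop (tracking previous digit, a failure flag and an accumulating run-length list) is replaced by a sorted-comparison monotonicity check plus a separate groupby run-length pass.
import Mathlib
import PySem

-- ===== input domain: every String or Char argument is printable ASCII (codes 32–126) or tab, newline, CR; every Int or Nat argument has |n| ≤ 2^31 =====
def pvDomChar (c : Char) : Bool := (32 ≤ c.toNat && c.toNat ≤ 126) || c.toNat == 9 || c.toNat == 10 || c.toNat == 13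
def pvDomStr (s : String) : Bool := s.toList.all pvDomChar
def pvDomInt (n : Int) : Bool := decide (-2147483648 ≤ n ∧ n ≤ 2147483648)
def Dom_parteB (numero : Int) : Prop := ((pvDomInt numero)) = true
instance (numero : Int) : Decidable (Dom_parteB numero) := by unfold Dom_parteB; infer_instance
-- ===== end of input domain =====

-- B replaces A's fused monotonicity+run-length loop by `digits == sorted(digits)` plus a groupby run-length pass (objective: simpler).

-- int(c) for a single Dom-admissible (ASCII) char: the digit's value; 0 only stands where
-- Python's int() raises ValueError, which Pre_parteB excludes (str of a nonnegative int is all digits).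
def pyDigit (c : Char) : Int := if '0' ≤ c ∧ c ≤ '9' then (c.toNat : Int) - 48 else 0

-- ===== PORT A =====
-- one loop step: state = (cagada, double, letra_anterior-as-int, repeticiones)
def stepA (st : Bool × Int × Int × List Int) (letra : Int) : Bool × Int × Int × List Int :=
  let (cagada, double, letra_anterior, repeticiones) := st
  if letra_anterior ≤ letra then
    if letra = letra_anterior then (cagada, double + 1, letra, repeticiones)
    else (cagada, 1, letra, repeticiones ++ [double])
  else (true, double, letra, repeticiones)

def parteB (numero : Int) : Bool :=
  let stringified := PySem.Int.toChars numero
  let (cagada, double, _, repeticiones) := (stringified.map pyDigit).foldl stepA (false, 0, -1, [])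
  let repeticiones := repeticiones ++ [double]
  if decide (2 ∈ repeticiones) && !cagada then true else false

-- ===== PORT B =====
-- run lengths of maximal equal-element blocks (itertools.groupby pass)
def runsFrom (x : Int) (cnt : Int) : List Int → List Int
  | [] => [cnt]
  | y :: ys => if y = x then runsFrom x (cnt + 1) ys else cnt :: runsFrom y 1 ys

def runLengths : List Int → List Int
  | [] => []
  | x :: xs => runsFrom x 1 xs

def parteB_alt (numero : Int) : Bool :=
  let digits := (PySem.Int.toChars numero).map pyDigit
  if digits ≠ PySem.List.sorted digits (fun x => x) false then false
  else (runLengths digits).any (fun g => g == 2)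

-- ===== PRECONDITION & SPEC =====
-- Pre_ excludes negative numero: str(numero) then starts with '-' and int('-') raises ValueError in A (and in B).
def Pre_parteB (numero : Int) : Prop := 0 ≤ numero
instance (numero : Int) : Decidable (Pre_parteB numero) := by unfold Pre_parteB; infer_instance
def pvWitness_parteB : Int := 122

def Spec_parteB (numero : Int) (out : Bool) : Prop := out = parteB_alt numero
instance (numero : Int) (out : Bool) : Decidable (Spec_parteB numero out) := by unfold Spec_parteB; infer_instance

-- ===== CLAIM (what is proved, stated in full; the proofs are below) =====
def Claim_equal_parteB : Prop := ∀ (numero : Int), Dom_parteB numero → Pre_parteB numero → Spec_parteB numero (parteB numero)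

-- ===== LEMMAS AND PROOFS =====

theorem pyDigit_nonneg (c : Char) : 0 ≤ pyDigit c := by
  unfold pyDigit
  split
  · next h =>
    have : 48 ≤ c.toNat := h.1
    omega
  · exact le_refl 0

-- once cagada is set it stays set
theorem foldl_stepA_true (ds : List Int) (dbl prev : Int) (reps : List Int) :
    (ds.foldl stepA (true, dbl, prev, reps)).1 = true := by
  induction ds generalizing dbl prev reps with
  | nil => rfl
  | cons d ds ih =>
    simp only [List.foldl_cons, stepA]
    by_cases hle : prev ≤ d
    · by_cases heq : d = prev <;> simp [hle, heq, ih]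
    · simp [hle, ih]

-- a violation of the ≤-chain sets cagada
theorem foldl_stepA_notchain (ds : List Int) (cag : Bool) (dbl prev : Int) (reps : List Int)
    (h : ¬ List.IsChain (· ≤ ·) (prev :: ds)) :
    (ds.foldl stepA (cag, dbl, prev, reps)).1 = true := by
  induction ds generalizing cag dbl prev reps with
  | nil => exact absurd (by simp) h
  | cons d ds ih =>
    rw [List.isChain_cons_cons] at h
    simp only [List.foldl_cons, stepA]
    by_cases hle : prev ≤ d
    · have hnc : ¬ List.IsChain (· ≤ ·) (d :: ds) := fun hc => h ⟨hle, hc⟩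
      by_cases heq : d = prev
      · rw [if_pos hle, if_pos heq]
        exact ih _ _ _ _ hnc
      · rw [if_pos hle, if_neg heq]
        exact ih _ _ _ _ hnc
    · simp [hle, foldl_stepA_true]

-- on a ≤-chain, A's loop never sets cagada and accumulates exactly runsFrom prev cnt ds
theorem foldl_stepA_chain (ds : List Int) (cag : Bool) (cnt prev : Int) (reps : List Int)
    (h : List.IsChain (· ≤ ·) (prev :: ds)) :
    (fun st => (st.1, st.2.2.2 ++ [st.2.1])) (ds.foldl stepA (cag, cnt, prev, reps))
      = (cag, reps ++ runsFrom prev cnt ds) := by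
  induction ds generalizing cag cnt prev reps with
  | nil => simp [runsFrom]
  | cons d ds ih =>
    rw [List.isChain_cons_cons] at h
    by_cases heq : d = prev
    · simpa [stepA, runsFrom, heq, h.1] using ih cag (cnt + 1) d reps (heq ▸ h.2)
    · simpa [stepA, runsFrom, heq, h.1] using ih cag 1 d (reps ++ [cnt]) h.2

theorem core_eq (ds : List Int) (hpos : ∀ d ∈ ds, 0 ≤ d) :
    (let (cagada, double, _, repeticiones) := ds.foldl stepA (false, 0, -1, [])
     let repeticiones := repeticiones ++ [double]
     if decide (2 ∈ repeticiones) && !cagada then true else false)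
    = (if ds ≠ PySem.List.sorted ds (fun x => x) false then false
       else (runLengths ds).any (fun g => g == 2)) := by
  by_cases hs : ds = PySem.List.sorted ds (fun x => x) false
  · -- sorted case: ds is a ≤-chain
    have hpw : ds.Pairwise (· ≤ ·) := by
      have := PySem.List.sorted_pairwise (xs := ds) (key := fun x : Int => x)
      rw [← hs] at this; exact this
    cases ds with
    | nil => simp [runLengths]
    | cons d rest =>
      have hd0 : (0 : Int) ≤ d := hpos d (by simp)
      have hch : List.IsChain (· ≤ ·) (d :: rest) := hpw.isChain
      have hne : ¬ (d = (-1 : Int)) := by omega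
      have hle : (-1 : Int) ≤ d := by omega
      have hrun := foldl_stepA_chain rest false 1 d [0] hch
      rcases h2 : rest.foldl stepA (false, 1, d, [0]) with ⟨cag, dbl, pv, reps⟩
      rw [h2] at hrun
      simp only [Prod.mk.injEq] at hrun
      simp only [List.foldl_cons, stepA, hle, hne, if_true, if_false,
        List.nil_append, h2]
      simp only [← hs, runLengths, hrun.1, hrun.2]
      simp only [ne_eq, not_true_eq_false, if_false, Bool.not_false, Bool.and_true,
        decide_eq_true_eq]
      have hiff : (2 ∈ ([0] ++ runsFrom d 1 rest)) ↔
          ((runsFrom d 1 rest).any (fun g => g == 2) = true) := by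
        rw [List.any_eq_true]
        constructor
        · intro hm
          rcases List.mem_append.mp hm with hm | hm
          · simp at hm
          · exact ⟨2, hm, rfl⟩
        · rintro ⟨g, hg, hg2⟩
          rw [beq_iff_eq] at hg2
          subst hg2
          exact List.mem_append.mpr (Or.inr hg)
      split_ifs with hm
      · exact (hiff.mp hm).symm
      · rcases ha : (runsFrom d 1 rest).any (fun g => g == 2)
        · rfl
        · exact absurd (hiff.mpr ha) hm
  · -- not sorted: B returns false; A's cagada fires
    have hnp : ¬ ds.Pairwise (· ≤ ·) := by
      intro hpw
      exact hs (PySem.List.sorted_eq_self_of_pairwise ds (fun x => x) hpw).symm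
    have hnc : ¬ List.IsChain (· ≤ ·) ((-1 : Int) :: ds) := by
      intro hc
      exact hnp (List.isChain_iff_pairwise.mp hc.tail)
    have hcag := foldl_stepA_notchain ds false 0 (-1) [] hnc
    rcases h2 : ds.foldl stepA (false, 0, -1, []) with ⟨cag, dbl, pv, reps⟩
    rw [h2] at hcag
    simp only at hcag
    simp [hs, hcag]

-- ===== VERDICT (by name: the statement is the Claim_ definition above) =====
theorem parteB_spec : Claim_equal_parteB := by
  intro numero _ _
  unfold Spec_parteB parteB parteB_alt
  exact core_eq ((PySem.Int.toChars numero).map pyDigit)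
    (by intro d hd; simp only [List.mem_map] at hd; obtain ⟨c, _, rfl⟩ := hd; exact pyDigit_nonneg c)
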